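-- pv_equiv track=rewrite | github.com/DTDevelop/ProjectEuler | Problems11-20/Problem11.py | greatest_product_of_rev_diag
-- ===== SOURCE A (Python) =====
-- def greatest_product_of_rev_diag(matrix, adjacent):
--     """
--     given matrix and number of adjacent
--     return greatest product of reverse diagonal
--     """
--     greatest_product = 0
--
--     matrix_length = len(matrix)
--
--     for col in range(matrix_length-1, -1, -1):
--         for num in range(matrix_length-1, -1, -1): # relative number to compare
--             if col + adjacent > matrix_length: # not enough numbers diagonal
--                 break # next row
--             if num - adjacent < 0: # not enough numbers to the left
--                 break # next number
--             new_product = 1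
--             for inc in range(adjacent): # calculating product
--                 new_product *= matrix[col+inc][num-inc]
--             if new_product > greatest_product:
--                 greatest_product = new_product
--
--     return greatest_product
-- ===== SOURCE B (Python) =====
-- def greatest_product_of_rev_diag(matrix, adjacent):
--     """
--     given matrix and number of adjacent
--     return greatest product of reverse diagonal
--     """
--     n = len(matrix)
--     best = 0
--     # one pass per anti-diagonal, sliding-window product with zero tracking
--     for d in range(2 * n - 1):
--         lo = max(0, d - n + 1)
--         hi = min(d, n - 1)
--         if hi - lo + 1 < adjacent:  # no full window on this anti-diagonal
--             continue
--         seg = [matrix[r][d - r] for r in range(lo, hi + 1)]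
--         prod = 1
--         zeros = 0
--         for i, x in enumerate(seg):
--             if x == 0:
--                 zeros += 1
--             else:
--                 prod *= x
--             if i >= adjacent:
--                 y = seg[i - adjacent]
--                 if y == 0:
--                     zeros -= 1
--                 else:
--                     prod //= y
--             if i >= adjacent - 1:
--                 p = prod if zeros == 0 else 0
--                 if p > best:
--                     best = p
--     return best
-- ===== Notes on version B (the rewrite author's own statement) =====
-- stated objective: alternative
-- what changed: B walks each anti-diagonal that carries a full window once with a sliding-window product (product of the non-zero window entries plus a zero count) instead of A recomputing the adjacent-length product from scratch for every start cell; Pre_ restricts to adjacent >= 0 with rows long enough for the anti-diagonals B scans, where B raises no IndexError.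
-- intended difference: On matrices where some anti-diagonal window whose leftmost entry lies in column 0 has a positive product strictly greater than every window product A considers, A skips those windows (its break tests num - adjacent < 0 instead of num - adjacent + 1 < 0) and returns the smaller maximum, while B returns the true greatest product over all in-bounds windows, which is the intended value. — e.g. on greatest_product_of_rev_diag([[1, 3], [2, 1]], 2): A returns 0, B returns 6
-- outside the precondition, e.g. on greatest_product_of_rev_diag([[1, 2], [3, 4]], -1): A returns 1, B raises IndexError; on greatest_product_of_rev_diag([[1], [2, 3]], 2): A returns 0, B raises IndexError
import Mathlib
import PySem

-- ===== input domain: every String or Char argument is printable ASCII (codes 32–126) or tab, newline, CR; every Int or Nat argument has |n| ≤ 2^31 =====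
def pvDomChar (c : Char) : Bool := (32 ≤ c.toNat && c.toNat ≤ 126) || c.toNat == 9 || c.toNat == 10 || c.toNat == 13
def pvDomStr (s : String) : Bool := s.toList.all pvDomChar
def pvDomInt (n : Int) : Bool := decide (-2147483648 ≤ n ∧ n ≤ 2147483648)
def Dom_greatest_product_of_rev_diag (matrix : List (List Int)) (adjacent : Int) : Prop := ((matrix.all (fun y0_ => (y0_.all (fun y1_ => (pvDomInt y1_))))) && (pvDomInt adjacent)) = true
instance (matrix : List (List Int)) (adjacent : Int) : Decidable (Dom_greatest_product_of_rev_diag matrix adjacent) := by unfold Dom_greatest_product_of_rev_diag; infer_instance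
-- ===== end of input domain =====

-- B walks each anti-diagonal once with a sliding-window product (product of the non-zero window
-- entries plus a zero count) instead of A's per-start-cell product recomputation.

-- ===== PORT A =====
-- inner product loop: `for inc in range(adjacent): new_product *= matrix[col+inc][num-inc]`
def pvAProd (matrix : List (List Int)) (adjacent col num : Int) : Int :=
  (PySem.List.pyRange 0 adjacent 1).foldl
    (fun acc inc => acc * PySem.List.pyGetD (PySem.List.pyGetD matrix (col + inc) []) (num - inc) 0) 1

-- the `for num in range(matrix_length-1, -1, -1)` loop with its two `break`s
def pvAInner (matrix : List (List Int)) (adjacent n col : Int) : List Int → Int → Int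
  | [], g => g
  | num :: rest, g =>
    if col + adjacent > n then g
    else if num - adjacent < 0 then g
    else
      let p := pvAProd matrix adjacent col num
      pvAInner matrix adjacent n col rest (if p > g then p else g)

def greatest_product_of_rev_diag (matrix : List (List Int)) (adjacent : Int) : Int :=
  let n : Int := matrix.length
  (PySem.List.pyRange (n - 1) (-1) (-1)).foldl
    (fun g col => pvAInner matrix adjacent n col (PySem.List.pyRange (n - 1) (-1) (-1)) g) 0

-- ===== PORT B =====
-- one step of B's sliding window: state (best, prod, zeros), input (i, x)
def pvBStep (seg : List Int) (adjacent : Int) (st : Int × Int × Int) (ix : Int × Int) : Int × Int × Int :=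
  let p1 : Int × Int := if ix.2 = 0 then (st.2.1, st.2.2 + 1) else (st.2.1 * ix.2, st.2.2)
  let p2 : Int × Int :=
    if ix.1 ≥ adjacent then
      let y := PySem.List.pyGetD seg (ix.1 - adjacent) 0
      if y = 0 then (p1.1, p1.2 - 1) else (PySem.Int.floordiv p1.1 y, p1.2)
    else p1
  let best :=
    if ix.1 ≥ adjacent - 1 then
      let p := if p2.2 = 0 then p2.1 else 0
      if p > st.1 then p else st.1
    else st.1
  (best, p2.1, p2.2)

def greatest_product_of_rev_diag_alt (matrix : List (List Int)) (adjacent : Int) : Int :=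
  let n : Int := matrix.length
  (PySem.List.pyRange 0 (2 * n - 1) 1).foldl
    (fun best d =>
      let lo := max 0 (d - n + 1)
      let hi := min d (n - 1)
      if hi - lo + 1 < adjacent then best
      else
        let seg := (PySem.List.pyRange lo (hi + 1) 1).map
          (fun r => PySem.List.pyGetD (PySem.List.pyGetD matrix r []) (d - r) 0)
        ((PySem.List.enumerate seg 0).foldl (pvBStep seg adjacent) (best, 1, 0)).1)
    0

-- ===== PRECONDITION & SPEC =====
-- Pre_ restricts to the task's natural domain: adjacent ≥ 0 (for negative adjacent B's
-- seg[i - adjacent] raises IndexError while A returns 1) and, when 0 ≤ adjacent ≤ len(matrix),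
-- rows long enough for the anti-diagonals B scans (B reads every cell of each anti-diagonal
-- carrying a full window and raises IndexError on shorter rows; A, which reads only the windows
-- it skips column 0 of, may still return there).
def Pre_greatest_product_of_rev_diag (matrix : List (List Int)) (adjacent : Int) : Prop :=
  0 ≤ adjacent ∧ (adjacent ≤ (matrix.length : Int) →
    ∀ r < matrix.length,
      (matrix.length : Int) - max 0 ((r : Int) - ((matrix.length : Int) - adjacent))
        ≤ (((matrix.getD r []).length : Int)))
instance (matrix : List (List Int)) (adjacent : Int) : Decidable (Pre_greatest_product_of_rev_diag matrix adjacent) := by unfold Pre_greatest_product_of_rev_diag; infer_instance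

def pvWitness_greatest_product_of_rev_diag : List (List Int) × Int := ([[1, 2], [3, 4]], 1)

-- product of the window of k anti-diagonal cells starting at row c, column m (going down-left)
def pvW (M : List (List Int)) (k c m : Nat) : Int :=
  ((List.range k).map fun t => (M.getD (c + t) []).getD (m - t) 0).prod

-- On matrices where some anti-diagonal window whose leftmost entry lies in column 0 has a positive
-- product strictly greater than every window product A considers, A skips those windows (its break
-- tests num - adjacent < 0 instead of num - adjacent + 1 < 0) and returns the smaller maximum,
-- while B returns the true greatest product over all in-bounds windows, the intended value.
def D_greatest_product_of_rev_diag (matrix : List (List Int)) (adjacent : Int) : Prop :=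
  let k := min adjacent.toNat (matrix.length + 1)
  ∃ c < matrix.length, 0 < pvW matrix k c (k - 1) ∧
    ∀ c' < matrix.length, ∀ m < matrix.length, k ≤ m →
      pvW matrix k c' m < pvW matrix k c (k - 1)
instance (matrix : List (List Int)) (adjacent : Int) : Decidable (D_greatest_product_of_rev_diag matrix adjacent) := by unfold D_greatest_product_of_rev_diag; infer_instance

def Spec_greatest_product_of_rev_diag (matrix : List (List Int)) (adjacent : Int) (out : Int) : Prop := ¬ D_greatest_product_of_rev_diag matrix adjacent → out = greatest_product_of_rev_diag_alt matrix adjacent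
instance (matrix : List (List Int)) (adjacent : Int) (out : Int) : Decidable (Spec_greatest_product_of_rev_diag matrix adjacent out) := by unfold Spec_greatest_product_of_rev_diag; infer_instance

def pvDiffWitness_greatest_product_of_rev_diag : List (List Int) × Int := ([[1, 3], [2, 1]], 2)
def pvDiffWitnessOut_greatest_product_of_rev_diag : Int × Int := (0, 6)

-- ===== CLAIM (what is proved, stated in full; the proofs are below) =====
def Claim_unchanged_greatest_product_of_rev_diag : Prop := ∀ (matrix : List (List Int)) (adjacent : Int), Dom_greatest_product_of_rev_diag matrix adjacent → Pre_greatest_product_of_rev_diag matrix adjacent → Spec_greatest_product_of_rev_diag matrix adjacent (greatest_product_of_rev_diag matrix adjacent)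
def Claim_changed_greatest_product_of_rev_diag : Prop := Dom_greatest_product_of_rev_diag (pvDiffWitness_greatest_product_of_rev_diag.1) (pvDiffWitness_greatest_product_of_rev_diag.2) ∧ Pre_greatest_product_of_rev_diag (pvDiffWitness_greatest_product_of_rev_diag.1) (pvDiffWitness_greatest_product_of_rev_diag.2) ∧ D_greatest_product_of_rev_diag (pvDiffWitness_greatest_product_of_rev_diag.1) (pvDiffWitness_greatest_product_of_rev_diag.2) ∧ greatest_product_of_rev_diag (pvDiffWitness_greatest_product_of_rev_diag.1) (pvDiffWitness_greatest_product_of_rev_diag.2) = pvDiffWitnessOut_greatest_product_of_rev_diag.1 ∧ greatest_product_of_rev_diag_alt (pvDiffWitness_greatest_product_of_rev_diag.1) (pvDiffWitness_greatest_product_of_rev_diag.2) = pvDiffWitnessOut_greatest_product_of_rev_diag.2 ∧ pvDiffWitnessOut_greatest_product_of_rev_diag.1 ≠ pvDiffWitnessOut_greatest_product_of_rev_diag.2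
def Claim_exact_greatest_product_of_rev_diag : Prop := ∀ (matrix : List (List Int)) (adjacent : Int), Dom_greatest_product_of_rev_diag matrix adjacent → Pre_greatest_product_of_rev_diag matrix adjacent → D_greatest_product_of_rev_diag matrix adjacent → greatest_product_of_rev_diag matrix adjacent ≠ greatest_product_of_rev_diag_alt matrix adjacent

-- ===== LEMMAS AND PROOFS =====

-- entry access, totalised the same way both ports do
def pvE (matrix : List (List Int)) (r c : Int) : Int :=
  PySem.List.pyGetD (PySem.List.pyGetD matrix r []) c 0

-- the product of the anti-diagonal window of length kn starting at (col, num)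
def pvQ (matrix : List (List Int)) (kn : Nat) (col num : Int) : Int :=
  ((List.range kn).map (fun (t : Nat) => pvE matrix (col + (t : Int)) (num - (t : Int)))).prod

def pvUpd (matrix : List (List Int)) (kn : Nat) (g : Int) (w : Int × Int) : Int :=
  max g (pvQ matrix kn w.1 w.2)

-- all products of contiguous windows of length kn in seg, left to right
def pvWinProds (seg : List Int) (kn : Nat) : List Int :=
  (List.range (seg.length + 1 - kn)).map (fun s => ((seg.drop s).take kn).prod)

-- the last (at most) kn elements of seg
def pvTail (seg : List Int) (kn : Nat) : List Int := seg.drop (seg.length - kn)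

-- A's window-start pairs, in A's iteration order
def pvLA (matrix : List (List Int)) (a : Int) : List (Int × Int) :=
  (PySem.List.pyRange ((matrix.length : Int) - 1) (-1) (-1)).flatMap
    (fun col =>
      if col + a ≤ (matrix.length : Int) then
        (PySem.List.pyRange ((matrix.length : Int) - 1) (a - 1) (-1)).map (fun num => (col, num))
      else [])

-- B's window-start pairs, in B's iteration order
def pvLB (matrix : List (List Int)) (kn : Nat) : List (Int × Int) :=
  (PySem.List.pyRange 0 (2 * (matrix.length : Int) - 1) 1).flatMap
    (fun d =>
      (List.range ((min d ((matrix.length : Int) - 1) + 1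
          - max 0 (d - (matrix.length : Int) + 1)).toNat + 1 - kn)).map
        (fun (s : Nat) => (max 0 (d - (matrix.length : Int) + 1) + (s : Int),
          d - max 0 (d - (matrix.length : Int) + 1) - (s : Int))))

theorem pv_max_if (p g : Int) : (if p > g then p else g) = max g p := by
  rcases le_total p g with h | h
  · rw [max_eq_left h, if_neg (by omega)]
  · rw [max_eq_right h]; split_ifs with hpg
    · rfl
    · omega

theorem pvAProd_eq_pvQ (matrix : List (List Int)) (kn : Nat) (col num : Int) :
    pvAProd matrix (kn : Int) col num = pvQ matrix kn col num := by
  unfold pvAProd pvQ pvE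
  rw [PySem.List.pyRange_zero_nat, List.prod_eq_foldl, List.foldl_map, List.foldl_map]

theorem pvAInner_break (matrix : List (List Int)) (a n col num : Int) (rest : List Int) (g : Int)
    (h : col + a > n ∨ num - a < 0) :
    pvAInner matrix a n col (num :: rest) g = g := by
  unfold pvAInner; split_ifs with h1 h2 <;> first | rfl | omega

theorem pvAInner_no_break (matrix : List (List Int)) (a n col : Int)
    (h1 : ¬ col + a > n) (l1 l2 : List Int) (g : Int) (h2 : ∀ x ∈ l1, ¬ x - a < 0) :
    pvAInner matrix a n col (l1 ++ l2) g =
      pvAInner matrix a n col l2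
        (l1.foldl (fun g num =>
          if pvAProd matrix a col num > g then pvAProd matrix a col num else g) g) := by
  induction l1 generalizing g with
  | nil => simp
  | cons x xs ih =>
      have hx : ¬ x - a < 0 := h2 x (by simp)
      simp only [List.cons_append, pvAInner, if_neg h1, if_neg hx, List.foldl_cons]
      exact ih _ (fun y hy => h2 y (by simp [hy]))

-- A computes the fold of max over its window products (main case 1 ≤ kn ≤ n-1)
theorem pvA_char_main (matrix : List (List Int)) (kn : Nat) (hk : 1 ≤ kn)
    (hn : (kn : Int) ≤ (matrix.length : Int) - 1) :
    greatest_product_of_rev_diag matrix (kn : Int) =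
      (pvLA matrix (kn : Int)).foldl (pvUpd matrix kn) 0 := by
  unfold greatest_product_of_rev_diag pvLA
  rw [List.foldl_flatMap]
  apply PySem.List.foldl_congr_mem
  intro g col hcol
  rw [PySem.List.mem_pyRange_neg_one] at hcol
  by_cases hc : col + (kn : Int) ≤ (matrix.length : Int)
  · rw [if_pos hc]
    have hsplit : PySem.List.pyRange ((matrix.length : Int) - 1) (-1) (-1)
        = PySem.List.pyRange ((matrix.length : Int) - 1) ((kn : Int) - 1) (-1)
          ++ PySem.List.pyRange ((kn : Int) - 1) (-1) (-1) := by
      rw [PySem.List.pyRange_neg_one_eq_reverse ((matrix.length : Int) - 1) (-1),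
          PySem.List.pyRange_neg_one_eq_reverse ((matrix.length : Int) - 1) ((kn : Int) - 1),
          PySem.List.pyRange_neg_one_eq_reverse ((kn : Int) - 1) (-1),
          ← List.reverse_append]
      congr 1
      exact PySem.List.pyRange_one_append (-1 + 1) ((kn : Int) - 1 + 1)
        ((matrix.length : Int) - 1 + 1) (by omega) (by omega)
    rw [hsplit, pvAInner_no_break matrix (kn : Int) (matrix.length : Int) col (by omega) _ _ g
      (fun y hy => by rw [PySem.List.mem_pyRange_neg_one] at hy; omega)]
    rw [PySem.List.pyRange_neg_one_cons (show (-1 : Int) < (kn : Int) - 1 by omega),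
        pvAInner_break _ _ _ _ _ _ _ (Or.inr (by omega))]
    rw [List.foldl_map]
    apply PySem.List.foldl_congr_mem
    intro acc num _
    show (if pvAProd matrix (kn : Int) col num > acc then pvAProd matrix (kn : Int) col num else acc)
        = pvUpd matrix kn acc (col, num)
    rw [pv_max_if, pvAProd_eq_pvQ]
    rfl
  · rw [if_neg hc]
    simp only [List.foldl_nil]
    rw [PySem.List.pyRange_neg_one_cons (show (-1 : Int) < (matrix.length : Int) - 1 by omega),
        pvAInner_break _ _ _ _ _ _ _ (Or.inl (by omega))]

theorem pv_foldl_id (l : List Int) (b : Int) : l.foldl (fun g _ => g) b = b := by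
  induction l generalizing b <;> simp_all

-- A returns 0 when adjacent ≥ n (every iteration breaks immediately)
theorem pvA_big (matrix : List (List Int)) (a : Int) (h : (matrix.length : Int) ≤ a) :
    greatest_product_of_rev_diag matrix a = 0 := by
  unfold greatest_product_of_rev_diag
  by_cases hn : matrix.length = 0
  · rw [hn]; norm_num [PySem.List.pyRange_neg_one_eq_nil]
  · rw [PySem.List.foldl_congr_mem _ _ (fun (g : Int) (_ : Int) => g) 0 ?_, pv_foldl_id]
    intro g col hcol
    rw [PySem.List.mem_pyRange_neg_one] at hcol
    rw [PySem.List.pyRange_neg_one_cons (show (-1 : Int) < (matrix.length : Int) - 1 by omega)]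
    exact pvAInner_break _ _ _ _ _ _ _ (by omega)

-- A's window list is empty when adjacent ≥ n
theorem pvLA_nil (matrix : List (List Int)) (kn : Nat)
    (h : (matrix.length : Int) ≤ (kn : Int)) : pvLA matrix (kn : Int) = [] := by
  unfold pvLA
  apply List.flatMap_eq_nil_iff.mpr
  intro col hcol
  rw [PySem.List.mem_pyRange_neg_one] at hcol
  split_ifs
  · rw [PySem.List.pyRange_neg_one_eq_nil (by omega)]; rfl
  · rfl

-- A computes the fold of max over its window products, for every kn ≥ 1
theorem pvA_char (matrix : List (List Int)) (kn : Nat) (hk : 1 ≤ kn) :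
    greatest_product_of_rev_diag matrix (kn : Int) =
      (pvLA matrix (kn : Int)).foldl (pvUpd matrix kn) 0 := by
  by_cases hn : (kn : Int) ≤ (matrix.length : Int) - 1
  · exact pvA_char_main matrix kn hk hn
  · rw [pvA_big matrix _ (by omega), pvLA_nil matrix kn (by omega)]
    rfl

-- the sliding-window scan over seg computes the fold of max over all window products
theorem pv_fdiv_cancel (a b : Int) (h : b ≠ 0) : PySem.Int.floordiv (b * a) b = a :=
  Int.mul_fdiv_cancel_left a h

theorem pv_pyGetD_append_left (pre : List Int) (x : Int) (i : Int) (h0 : 0 ≤ i)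
    (h1 : i < (pre.length : Int)) :
    PySem.List.pyGetD (pre ++ [x]) i 0 = PySem.List.pyGetD pre i 0 := by
  rw [PySem.List.pyGetD_eq_getElem _ 0 h0 (by simp; omega),
      PySem.List.pyGetD_eq_getElem _ 0 h0 (by omega)]
  exact List.getElem_append_left (by omega)

theorem pv_winval (w : List Int) :
    (if ((w.count 0 : Nat) : Int) = 0 then (w.filter (fun x => x ≠ 0)).prod else 0) = w.prod := by
  by_cases h : (0 : Int) ∈ w
  · rw [if_neg (by simpa [List.count_eq_zero] using h)]
    exact (List.prod_eq_zero_iff.mpr h).symm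
  · rw [if_pos (by simpa [List.count_eq_zero] using h)]
    congr 1
    refine List.filter_eq_self.mpr (fun a ha => ?_)
    simp only [ne_eq, decide_eq_true_eq]
    rintro rfl
    exact h ha

theorem pvWinProds_append (kn : Nat) (hk : 1 ≤ kn) (pre : List Int) (x : Int) :
    pvWinProds (pre ++ [x]) kn =
      pvWinProds pre kn ++
        (if kn ≤ pre.length + 1 then [(pvTail (pre ++ [x]) kn).prod] else []) := by
  unfold pvWinProds pvTail
  have hL : (pre ++ [x]).length = pre.length + 1 := by simp
  rw [hL]
  by_cases hE : kn ≤ pre.length + 1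
  · rw [if_pos hE]
    have h1 : pre.length + 1 + 1 - kn = (pre.length + 1 - kn) + 1 := by omega
    rw [h1, List.range_succ, List.map_append]
    congr 1
    · apply List.map_congr_left
      intro s hs
      rw [List.mem_range] at hs
      rw [List.drop_append_of_le_length (by omega),
          List.take_append_of_le_length (by rw [List.length_drop]; omega)]
    · simp only [List.map_cons, List.map_nil]
      congr 2
      exact List.take_of_length_le (by rw [List.length_drop, hL]; omega)
  · rw [if_neg hE]
    have h1 : pre.length + 1 + 1 - kn = 0 := by omega
    have h2 : pre.length + 1 - kn = 0 := by omega
    rw [h1, h2]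
    simp

theorem pvTail_small (kn : Nat) (pre : List Int) (x : Int) (h : pre.length < kn) :
    pvTail (pre ++ [x]) kn = pre ++ [x] := by
  unfold pvTail
  have hL : (pre ++ [x]).length = pre.length + 1 := by simp
  rw [hL, Nat.sub_eq_zero_of_le (by omega), List.drop_zero]

theorem pvTail_small' (kn : Nat) (pre : List Int) (h : pre.length ≤ kn) :
    pvTail pre kn = pre := by
  unfold pvTail
  rw [Nat.sub_eq_zero_of_le h, List.drop_zero]

theorem pvTail_big (kn : Nat) (pre : List Int) (x : Int) (hk : 1 ≤ kn) (h : kn ≤ pre.length) :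
    pvTail (pre ++ [x]) kn = pre.drop (pre.length + 1 - kn) ++ [x] := by
  unfold pvTail
  have hL : (pre ++ [x]).length = pre.length + 1 := by simp
  rw [hL, List.drop_append_of_le_length (by omega)]

theorem pvTail_cons (kn : Nat) (pre : List Int) (hk : 1 ≤ kn) (h : kn ≤ pre.length) :
    pvTail pre kn = pre.getD (pre.length - kn) 0 :: pre.drop (pre.length + 1 - kn) := by
  unfold pvTail
  have h2 : pre.length - kn + 1 = pre.length + 1 - kn := by omega
  rw [List.drop_eq_getElem_cons (by omega), List.getD_eq_getElem _ _ (by omega), h2]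

theorem pv_fp_append0 (D : List Int) :
    ((D ++ [(0 : Int)]).filter (fun x => x ≠ 0)).prod = (D.filter (fun x => x ≠ 0)).prod := by
  simp [List.filter_append]

theorem pv_fp_appendx (D : List Int) (x : Int) (hx : x ≠ 0) :
    ((D ++ [x]).filter (fun x => x ≠ 0)).prod = (D.filter (fun x => x ≠ 0)).prod * x := by
  simp [List.filter_append, hx]

theorem pv_cnt_append0 (D : List Int) : (D ++ [(0 : Int)]).count 0 = D.count 0 + 1 := by
  simp

theorem pv_cnt_appendx (D : List Int) (x : Int) (hx : x ≠ 0) :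
    (D ++ [x]).count 0 = D.count 0 := by
  simp [List.count_append, hx]

theorem pv_fp_cons0 (D : List Int) :
    (((0 : Int) :: D).filter (fun x => x ≠ 0)).prod = (D.filter (fun x => x ≠ 0)).prod := by
  simp

theorem pv_fp_consy (y : Int) (D : List Int) (hy : y ≠ 0) :
    ((y :: D).filter (fun x => x ≠ 0)).prod = y * (D.filter (fun x => x ≠ 0)).prod := by
  simp [hy]

theorem pv_cnt_cons0 (D : List Int) : (((0 : Int) :: D).count 0) = D.count 0 + 1 := by
  simp

theorem pv_cnt_consy (y : Int) (D : List Int) (hy : y ≠ 0) :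
    ((y :: D).count 0) = D.count 0 := by
  simp [hy]

theorem pvSlide (kn : Nat) (hk : 1 ≤ kn) (seg : List Int) (b : Int) :
    (PySem.List.enumerate seg 0).foldl (pvBStep seg (kn : Int)) (b, 1, 0)
      = ((pvWinProds seg kn).foldl (fun g p => max g p) b,
         ((pvTail seg kn).filter (fun x => x ≠ 0)).prod,
         (((pvTail seg kn).count 0 : Nat) : Int)) := by
  induction seg using List.reverseRecOn with
  | nil =>
      have h0 : pvWinProds [] kn = [] := by
        unfold pvWinProds
        simp only [List.length_nil, Nat.zero_add, Nat.sub_eq_zero_of_le hk, List.range_zero,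
          List.map_nil]
      simp [PySem.List.enumerate, h0, pvTail]
  | append_singleton pre x ih =>
      have hcongr : (PySem.List.enumerate pre 0).foldl (pvBStep (pre ++ [x]) (kn : Int)) (b, 1, 0)
          = (PySem.List.enumerate pre 0).foldl (pvBStep pre (kn : Int)) (b, 1, 0) := by
        apply PySem.List.foldl_congr_mem
        intro st p hp
        rcases (PySem.List.mem_enumerate_iff pre 0 p).1 hp with ⟨k, hkl, rfl⟩
        unfold pvBStep
        dsimp only
        by_cases hge : (0 : Int) + (k : Int) ≥ (kn : Int)
        · rw [pv_pyGetD_append_left pre x _ (by omega) (by omega)]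
        · simp only [if_neg hge]
      rw [PySem.List.enumerate_append, List.foldl_append, hcongr, ih,
          PySem.List.enumerate_cons, PySem.List.enumerate_nil, List.foldl_cons, List.foldl_nil,
          pvWinProds_append kn hk pre x, List.foldl_append]
      unfold pvBStep
      dsimp only
      by_cases hA : (0 : Int) + (pre.length : Int) ≥ (kn : Int)
      · -- a full window exists: the leftmost element of the previous window leaves
        have hAL : kn ≤ pre.length := by omega
        have hy : PySem.List.pyGetD (pre ++ [x]) (0 + (pre.length : Int) - (kn : Int)) 0
            = pre.getD (pre.length - kn) 0 := by
          have h1 : (0 : Int) + (pre.length : Int) - (kn : Int)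
              = ((pre.length - kn : Nat) : Int) := by omega
          rw [h1, PySem.List.pyGetD_natCast]
          exact List.getD_append pre [x] 0 (pre.length - kn) (by omega)
        rw [if_pos hA, if_pos (show (0 : Int) + (pre.length : Int) ≥ (kn : Int) - 1 by omega),
            if_pos (show kn ≤ pre.length + 1 by omega), hy,
            pvTail_cons kn pre hk hAL, pvTail_big kn pre x hk hAL]
        set y := pre.getD (pre.length - kn) 0 with hydef
        set D := pre.drop (pre.length + 1 - kn) with hDdef
        by_cases hx : x = 0
        · subst hx
          rw [if_pos rfl]
          by_cases hy0 : y = 0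
          · rw [if_pos hy0]
            dsimp only
            have hprod : ((y :: D).filter (fun x => x ≠ 0)).prod
                = ((D ++ [(0 : Int)]).filter (fun x => x ≠ 0)).prod := by
              rw [hy0, pv_fp_cons0, pv_fp_append0]
            have hcnt : (((y :: D).count 0 : Nat) : Int) + 1 - 1
                = (((D ++ [(0 : Int)]).count 0 : Nat) : Int) := by
              rw [hy0, pv_cnt_cons0, pv_cnt_append0]; push_cast; ring
            rw [hprod, hcnt, pv_winval (D ++ [(0 : Int)]), pv_max_if]
            simp only [List.foldl_cons, List.foldl_nil]
          · rw [if_neg hy0]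
            dsimp only
            have hprod : PySem.Int.floordiv ((y :: D).filter (fun x => x ≠ 0)).prod y
                = ((D ++ [(0 : Int)]).filter (fun x => x ≠ 0)).prod := by
              rw [pv_fp_consy y D hy0, pv_fdiv_cancel _ y hy0, pv_fp_append0]
            have hcnt : (((y :: D).count 0 : Nat) : Int) + 1
                = (((D ++ [(0 : Int)]).count 0 : Nat) : Int) := by
              rw [pv_cnt_consy y D hy0, pv_cnt_append0]; push_cast; ring
            rw [hprod, hcnt, pv_winval (D ++ [(0 : Int)]), pv_max_if]
            simp only [List.foldl_cons, List.foldl_nil]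
        · rw [if_neg hx]
          by_cases hy0 : y = 0
          · rw [if_pos hy0]
            dsimp only
            have hprod : ((y :: D).filter (fun x => x ≠ 0)).prod * x
                = ((D ++ [x]).filter (fun x => x ≠ 0)).prod := by
              rw [hy0, pv_fp_cons0, pv_fp_appendx D x hx]
            have hcnt : (((y :: D).count 0 : Nat) : Int) - 1
                = (((D ++ [x]).count 0 : Nat) : Int) := by
              rw [hy0, pv_cnt_cons0, pv_cnt_appendx D x hx]; push_cast; ring
            rw [hprod, hcnt, pv_winval (D ++ [x]), pv_max_if]
            simp only [List.foldl_cons, List.foldl_nil]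
          · rw [if_neg hy0]
            dsimp only
            have hprod : PySem.Int.floordiv (((y :: D).filter (fun x => x ≠ 0)).prod * x) y
                = ((D ++ [x]).filter (fun x => x ≠ 0)).prod := by
              rw [pv_fp_consy y D hy0, mul_assoc, pv_fdiv_cancel _ y hy0, pv_fp_appendx D x hx]
            have hcnt : (((y :: D).count 0 : Nat) : Int)
                = (((D ++ [x]).count 0 : Nat) : Int) := by
              rw [pv_cnt_consy y D hy0, pv_cnt_appendx D x hx]
            rw [hprod, hcnt, pv_winval (D ++ [x]), pv_max_if]
            simp only [List.foldl_cons, List.foldl_nil]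
      · -- the window is still growing: no element is removed
        have hT : pvTail (pre ++ [x]) kn = pre ++ [x] := pvTail_small kn pre x (by omega)
        have hTp : pvTail pre kn = pre := pvTail_small' kn pre (by omega)
        rw [if_neg hA, hT, hTp]
        by_cases hx : x = 0
        · subst hx
          rw [if_pos rfl]
          dsimp only
          have hprod : (pre.filter (fun x => x ≠ 0)).prod
              = ((pre ++ [(0 : Int)]).filter (fun x => x ≠ 0)).prod := (pv_fp_append0 pre).symm
          have hcnt : ((pre.count 0 : Nat) : Int) + 1
              = (((pre ++ [(0 : Int)]).count 0 : Nat) : Int) := by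
            rw [pv_cnt_append0]; push_cast; ring
          rw [hprod, hcnt]
          by_cases hE : (0 : Int) + (pre.length : Int) ≥ (kn : Int) - 1
          · rw [if_pos hE, if_pos (show kn ≤ pre.length + 1 by omega),
                pv_winval (pre ++ [(0 : Int)]), pv_max_if]
            simp only [List.foldl_cons, List.foldl_nil]
          · rw [if_neg hE, if_neg (show ¬ kn ≤ pre.length + 1 by omega)]
            simp only [List.foldl_nil]
        · rw [if_neg hx]
          dsimp only
          have hprod : (pre.filter (fun x => x ≠ 0)).prod * x
              = ((pre ++ [x]).filter (fun x => x ≠ 0)).prod := (pv_fp_appendx pre x hx).symm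
          have hcnt : ((pre.count 0 : Nat) : Int)
              = (((pre ++ [x]).count 0 : Nat) : Int) := by rw [pv_cnt_appendx pre x hx]
          rw [hprod, hcnt]
          by_cases hE : (0 : Int) + (pre.length : Int) ≥ (kn : Int) - 1
          · rw [if_pos hE, if_pos (show kn ≤ pre.length + 1 by omega),
                pv_winval (pre ++ [x]), pv_max_if]
            simp only [List.foldl_cons, List.foldl_nil]
          · rw [if_neg hE, if_neg (show ¬ kn ≤ pre.length + 1 by omega)]
            simp only [List.foldl_nil]

-- each window product along an anti-diagonal is the product of one window pair
theorem pvWinProds_map (matrix : List (List Int)) (kn : Nat) (d lo hi : Int) :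
    pvWinProds ((PySem.List.pyRange lo (hi + 1) 1).map
        (fun r => PySem.List.pyGetD (PySem.List.pyGetD matrix r []) (d - r) 0)) kn
      = (List.range ((hi + 1 - lo).toNat + 1 - kn)).map
          (fun (s : Nat) => pvQ matrix kn (lo + (s : Int)) (d - lo - (s : Int))) := by
  unfold pvWinProds
  have hlen : ((PySem.List.pyRange lo (hi + 1) 1).map
      (fun r => PySem.List.pyGetD (PySem.List.pyGetD matrix r []) (d - r) 0)).length
      = (hi + 1 - lo).toNat := by
    rw [List.length_map, PySem.List.length_pyRange_one]
  rw [hlen]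
  apply List.map_congr_left
  intro s hs
  rw [List.mem_range] at hs
  rw [PySem.List.pyRange_one, List.map_map, ← List.map_drop, ← List.map_take]
  have hidx : (((List.range (hi + 1 - lo).toNat).drop s).take kn)
      = (List.range kn).map (fun (t : Nat) => s + t) := by
    apply List.ext_getElem
    · simp only [List.length_take, List.length_drop, List.length_map, List.length_range]
      omega
    · intro i h1 h2
      simp only [List.getElem_take, List.getElem_drop, List.getElem_range, List.getElem_map]
  rw [hidx, List.map_map]
  unfold pvQ pvE
  congr 1
  apply List.map_congr_left
  intro t _
  show PySem.List.pyGetD (PySem.List.pyGetD matrix (lo + ((s + t : Nat) : Int)) [])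
      (d - (lo + ((s + t : Nat) : Int))) 0
    = PySem.List.pyGetD (PySem.List.pyGetD matrix (lo + (s : Int) + (t : Int)) [])
      (d - lo - (s : Int) - (t : Int)) 0
  have h1 : lo + ((s + t : Nat) : Int) = lo + (s : Int) + (t : Int) := by push_cast; ring
  have h2 : d - (lo + (s : Int) + (t : Int)) = d - lo - (s : Int) - (t : Int) := by ring
  rw [h1, h2]

-- B computes the fold of max over its window products
theorem pvB_char (matrix : List (List Int)) (kn : Nat) (hk : 1 ≤ kn) :
    greatest_product_of_rev_diag_alt matrix (kn : Int) =
      (pvLB matrix kn).foldl (pvUpd matrix kn) 0 := by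
  unfold greatest_product_of_rev_diag_alt pvLB
  rw [List.foldl_flatMap]
  apply PySem.List.foldl_congr_mem
  intro best d _
  dsimp only
  by_cases hg : min d ((matrix.length : Int) - 1) - max 0 (d - (matrix.length : Int) + 1) + 1
      < (kn : Int)
  · rw [if_pos hg]
    have h0 : (min d ((matrix.length : Int) - 1) + 1
        - max 0 (d - (matrix.length : Int) + 1)).toNat + 1 - kn = 0 := by omega
    rw [h0]
    simp
  · rw [if_neg hg, pvSlide kn hk]
    dsimp only
    rw [pvWinProds_map matrix kn d (max 0 (d - (matrix.length : Int) + 1))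
        (min d ((matrix.length : Int) - 1)), List.foldl_map, List.foldl_map]
    rfl

theorem pvLA_mem (matrix : List (List Int)) (kn : Nat) (hk : 1 ≤ kn) (p : Int × Int) :
    p ∈ pvLA matrix (kn : Int) ↔
      0 ≤ p.1 ∧ p.1 + kn ≤ (matrix.length : Int) ∧
      (kn : Int) ≤ p.2 ∧ p.2 ≤ (matrix.length : Int) - 1 := by
  obtain ⟨c, m⟩ := p
  unfold pvLA
  simp only [List.mem_flatMap]
  constructor
  · rintro ⟨col, hcol, hp⟩
    rw [PySem.List.mem_pyRange_neg_one] at hcol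
    by_cases hc : col + (kn : Int) ≤ (matrix.length : Int)
    · rw [if_pos hc] at hp
      rcases List.mem_map.1 hp with ⟨num, hnum, heq⟩
      rw [PySem.List.mem_pyRange_neg_one] at hnum
      rw [Prod.mk.injEq] at heq
      obtain ⟨rfl, rfl⟩ := heq
      refine ⟨by omega, by omega, by omega, by omega⟩
    · rw [if_neg hc] at hp
      simp at hp
  · rintro ⟨h1, h2, h3, h4⟩
    refine ⟨c, by rw [PySem.List.mem_pyRange_neg_one]; omega, ?_⟩
    rw [if_pos (by omega)]
    exact List.mem_map.2 ⟨m, by rw [PySem.List.mem_pyRange_neg_one]; omega, rfl⟩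

theorem pvLB_mem (matrix : List (List Int)) (kn : Nat) (hk : 1 ≤ kn) (p : Int × Int) :
    p ∈ pvLB matrix kn ↔
      0 ≤ p.1 ∧ p.1 + kn ≤ (matrix.length : Int) ∧
      (kn : Int) - 1 ≤ p.2 ∧ p.2 ≤ (matrix.length : Int) - 1 := by
  obtain ⟨c, m⟩ := p
  unfold pvLB
  simp only [List.mem_flatMap, List.mem_map, List.mem_range, PySem.List.mem_pyRange_one]
  constructor
  · rintro ⟨d, ⟨hd1, hd2⟩, s, hs, heq⟩
    rw [Prod.mk.injEq] at heq
    obtain ⟨hc, hm⟩ := heq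
    refine ⟨by omega, by omega, by omega, by omega⟩
  · rintro ⟨h1, h2, h3, h4⟩
    refine ⟨c + m, ⟨by omega, by omega⟩,
      (c - max 0 (c + m - (matrix.length : Int) + 1)).toNat, by omega, ?_⟩
    rw [Prod.mk.injEq]
    constructor <;> omega

-- the fold over window pairs is the fold of max over the mapped products
theorem pv_foldl_upd_map (matrix : List (List Int)) (kn : Nat) (l : List (Int × Int)) (b : Int) :
    l.foldl (pvUpd matrix kn) b
      = (l.map (fun p : Int × Int => pvQ matrix kn p.1 p.2)).foldl max b := by
  rw [List.foldl_map]; rfl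

theorem pv_le_foldl_max (l : List Int) (b : Int) : b ≤ l.foldl max b := by
  induction l generalizing b with
  | nil => exact le_refl b
  | cons x xs ih => exact le_trans (le_max_left b x) (ih (max b x))

theorem pv_mem_le_foldl_max (l : List Int) : ∀ (b x : Int), x ∈ l → x ≤ l.foldl max b := by
  induction l with
  | nil => intro b x hx; simp at hx
  | cons y ys ih =>
      intro b x hx
      rcases List.mem_cons.1 hx with rfl | h
      · exact le_trans (le_max_right b x) (pv_le_foldl_max ys (max b x))
      · exact ih (max b y) x h

theorem pv_foldl_max_cases (l : List Int) (b : Int) : l.foldl max b = b ∨ l.foldl max b ∈ l := by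
  induction l generalizing b with
  | nil => exact Or.inl rfl
  | cons x xs ih =>
      rcases ih (max b x) with h | h
      · rcases le_total x b with hxb | hxb
        · exact Or.inl (by rw [List.foldl_cons, h, max_eq_left hxb])
        · exact Or.inr (by rw [List.foldl_cons, h, max_eq_right hxb]; exact List.mem_cons_self)
      · exact Or.inr (List.mem_cons_of_mem x h)

-- bridge: the proof-side window product pvQ equals the D_-side pvW on Nat indices
theorem pvQ_eq_pvW (matrix : List (List Int)) (kn : Nat) (cN mN : Nat) (h : kn ≤ mN + 1) :
    pvQ matrix kn (cN : Int) (mN : Int) = pvW matrix kn cN mN := by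
  unfold pvQ pvW pvE
  congr 1
  apply List.map_congr_left
  intro t ht
  rw [List.mem_range] at ht
  have h1 : (cN : Int) + (t : Int) = ((cN + t : Nat) : Int) := by push_cast; ring
  have h2 : (mN : Int) - (t : Int) = ((mN - t : Nat) : Int) := by omega
  rw [h1, h2, PySem.List.pyGetD_natCast, PySem.List.pyGetD_natCast]

-- a positive window product forces every window row to exist
theorem pvW_pos_le (matrix : List (List Int)) (kn c m : Nat) (hk : 1 ≤ kn)
    (h : 0 < pvW matrix kn c m) : c + kn ≤ matrix.length := by
  by_contra hgt
  have hz : (0 : Int) ∈ (List.range kn).map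
      (fun t => ((matrix.getD (c + t) []).getD (m - t) 0)) := by
    by_cases hc : matrix.length ≤ c
    · refine List.mem_map.2 ⟨0, by rw [List.mem_range]; omega, ?_⟩
      rw [List.getD_eq_default matrix _ (by omega)]
      simp
    · refine List.mem_map.2 ⟨matrix.length - c, by rw [List.mem_range]; omega, ?_⟩
      rw [List.getD_eq_default matrix _ (by omega)]
      simp
  have : pvW matrix kn c m = 0 := by
    unfold pvW
    exact List.prod_eq_zero_iff.mpr hz
  omega

-- B with adjacent = 0: every window is empty, so the running product is always 1
theorem pvBzero_fold (seg : List Int) (b : Int) :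
    (PySem.List.enumerate seg 0).foldl (pvBStep seg 0) (b, 1, 0)
      = (if seg.length = 0 then b else max b 1, 1, 0) := by
  induction seg using List.reverseRecOn with
  | nil => simp [PySem.List.enumerate]
  | append_singleton pre x ih =>
      have hcongr : (PySem.List.enumerate pre 0).foldl (pvBStep (pre ++ [x]) 0) (b, 1, 0)
          = (PySem.List.enumerate pre 0).foldl (pvBStep pre 0) (b, 1, 0) := by
        apply PySem.List.foldl_congr_mem
        intro st p hp
        rcases (PySem.List.mem_enumerate_iff pre 0 p).1 hp with ⟨k, hkl, rfl⟩
        unfold pvBStep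
        dsimp only
        rw [if_pos (show (0 : Int) + (k : Int) ≥ 0 by omega),
            if_pos (show (0 : Int) + (k : Int) ≥ 0 by omega),
            pv_pyGetD_append_left pre x _ (by omega) (by omega)]
      rw [PySem.List.enumerate_append, List.foldl_append, hcongr, ih,
          PySem.List.enumerate_cons, PySem.List.enumerate_nil, List.foldl_cons, List.foldl_nil]
      unfold pvBStep
      dsimp only
      have hy : PySem.List.pyGetD (pre ++ [x]) (0 + (pre.length : Int) - 0) 0 = x := by
        have h1 : (0 : Int) + (pre.length : Int) - 0 = ((pre.length : Nat) : Int) := by ring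
        rw [h1, PySem.List.pyGetD_natCast]
        simp
      rw [if_pos (show (0 : Int) + (pre.length : Int) ≥ 0 by omega), hy,
          if_pos (show (0 : Int) + (pre.length : Int) ≥ 0 - 1 by omega)]
      by_cases hx : x = 0
      · subst hx
        rw [if_pos rfl, if_pos rfl]
        dsimp only
        rw [if_pos (show (0 : Int) + 1 - 1 = 0 by ring), pv_max_if]
        have hL : (pre ++ [(0 : Int)]).length = pre.length + 1 := by simp
        rw [hL]
        by_cases hp : pre.length = 0
        · rw [if_pos hp, if_neg (by omega)]; norm_num
        · rw [if_neg hp, if_neg (by omega), max_assoc, max_self]; norm_num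
      · rw [if_neg hx, if_neg hx]
        dsimp only
        rw [show (1 : Int) * x = x * 1 by ring, pv_fdiv_cancel 1 x hx,
            if_pos rfl, pv_max_if]
        have hL : (pre ++ [x]).length = pre.length + 1 := by simp
        rw [hL]
        by_cases hp : pre.length = 0
        · rw [if_pos hp, if_neg (by omega)]
        · rw [if_neg hp, if_neg (by omega), max_assoc, max_self]

theorem pv_foldl_max_one (l : List Int) (g : Int) :
    l.foldl (fun g (_ : Int) => max g 1) (max g 1) = max g 1 := by
  induction l generalizing g with
  | nil => rfl
  | cons x xs ih => simp only [List.foldl_cons, max_assoc, max_self]; exact ih g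

theorem pvB_zero (matrix : List (List Int)) :
    greatest_product_of_rev_diag_alt matrix 0 = if 1 ≤ (matrix.length : Int) then 1 else 0 := by
  unfold greatest_product_of_rev_diag_alt
  by_cases hn : matrix.length = 0
  · rw [hn, if_neg (by norm_num)]
    norm_num [PySem.List.pyRange_one_eq_nil]
  · rw [if_pos (by exact_mod_cast Nat.one_le_iff_ne_zero.mpr hn)]
    rw [PySem.List.foldl_congr_mem _ _ (fun (b : Int) (_ : Int) => max b 1) 0 ?_]
    · rw [PySem.List.pyRange_one_cons (show (0 : Int) < 2 * (matrix.length : Int) - 1 by omega)]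
      simp only [List.foldl_cons]
      exact pv_foldl_max_one _ 0
    · intro b d hd
      rw [PySem.List.mem_pyRange_one] at hd
      dsimp only
      rw [if_neg (show ¬ min d ((matrix.length : Int) - 1) - max 0 (d - (matrix.length : Int) + 1)
            + 1 < 0 by omega),
        pvBzero_fold,
        if_neg (by rw [List.length_map, PySem.List.length_pyRange_one]; omega)]

-- A with adjacent ≤ 0 returns 1 on a nonempty matrix, 0 on the empty one
theorem pvA_nonpos (matrix : List (List Int)) (a : Int) (h : a ≤ 0) :
    greatest_product_of_rev_diag matrix a = if 1 ≤ (matrix.length : Int) then 1 else 0 := by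
  unfold greatest_product_of_rev_diag
  by_cases hn : matrix.length = 0
  · rw [hn, if_neg (by norm_num)]; norm_num [PySem.List.pyRange_neg_one_eq_nil]
  · rw [if_pos (by exact_mod_cast Nat.one_le_iff_ne_zero.mpr hn)]
    have hprod : ∀ col num : Int, pvAProd matrix a col num = 1 := by
      intro col num; unfold pvAProd
      rw [PySem.List.pyRange_one_eq_nil (by omega)]; rfl
    have hinner : ∀ (l : List Int) (col g : Int), col ≤ (matrix.length : Int) - 1 →
        (∀ y ∈ l, 0 ≤ y) →
        pvAInner matrix a (matrix.length : Int) col l g = l.foldl (fun g _ => max g 1) g := by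
      intro l col
      induction l with
      | nil => intro g _ _; rfl
      | cons y ys ih =>
          intro g hcol hall
          have hy : 0 ≤ y := hall y (by simp)
          simp only [pvAInner, if_neg (show ¬ col + a > (matrix.length : Int) by omega),
            if_neg (show ¬ y - a < 0 by omega), hprod, List.foldl_cons]
          rw [pv_max_if]
          exact ih (max g 1) hcol (fun z hz => hall z (by simp [hz]))
    rw [PySem.List.foldl_congr_mem _ _ (fun (g : Int) (_ : Int) => max g 1) 0 ?_]
    · rw [PySem.List.pyRange_neg_one_cons (show (-1 : Int) < (matrix.length : Int) - 1 by
        omega)]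
      simp only [List.foldl_cons]
      exact pv_foldl_max_one _ _
    · intro g col hcol
      rw [PySem.List.mem_pyRange_neg_one] at hcol
      rw [hinner _ col g (by omega)
        (fun y hy => by rw [PySem.List.mem_pyRange_neg_one] at hy; omega)]
      rw [PySem.List.pyRange_neg_one_cons (show (-1 : Int) < (matrix.length : Int) - 1 by
        omega)]
      simp only [List.foldl_cons]
      exact pv_foldl_max_one _ _

-- A ≤ B always, for kn ≥ 1
theorem pvA_le_B (matrix : List (List Int)) (kn : Nat) (hk : 1 ≤ kn) :
    greatest_product_of_rev_diag matrix (kn : Int)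
      ≤ greatest_product_of_rev_diag_alt matrix (kn : Int) := by
  rw [pvA_char matrix kn hk, pvB_char matrix kn hk, pv_foldl_upd_map, pv_foldl_upd_map]
  rcases pv_foldl_max_cases ((pvLA matrix (kn : Int)).map
      (fun p : Int × Int => pvQ matrix kn p.1 p.2)) 0 with h | h
  · rw [h]; exact pv_le_foldl_max _ 0
  · rcases List.mem_map.1 h with ⟨p, hp, hq⟩
    rw [← hq]
    apply pv_mem_le_foldl_max
    apply List.mem_map.2
    refine ⟨p, ?_, rfl⟩
    rw [pvLB_mem matrix kn hk]
    have := (pvLA_mem matrix kn hk p).1 hp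
    exact ⟨this.1, this.2.1, by omega, this.2.2.2⟩

-- a window whose product tops A's value witnesses D_ once B tops A
theorem pvMain_eq (matrix : List (List Int)) (kn : Nat) (hk : 1 ≤ kn)
    (hnd : ¬ D_greatest_product_of_rev_diag matrix (kn : Int)) :
    greatest_product_of_rev_diag matrix (kn : Int)
      = greatest_product_of_rev_diag_alt matrix (kn : Int) := by
  have hkt : ((kn : Int)).toNat = kn := by omega
  refine le_antisymm (pvA_le_B matrix kn hk) ?_
  rw [pvA_char matrix kn hk, pvB_char matrix kn hk, pv_foldl_upd_map, pv_foldl_upd_map]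
  rcases pv_foldl_max_cases ((pvLB matrix kn).map
      (fun p : Int × Int => pvQ matrix kn p.1 p.2)) 0 with h | h
  · rw [h]; exact pv_le_foldl_max _ 0
  · rcases List.mem_map.1 h with ⟨p, hp, hq⟩
    rw [← hq]
    have hmem := (pvLB_mem matrix kn hk p).1 hp
    by_cases hA : (kn : Int) ≤ p.2
    · -- the window is one A also considers
      apply pv_mem_le_foldl_max
      apply List.mem_map.2
      refine ⟨p, ?_, rfl⟩
      rw [pvLA_mem matrix kn hk]
      exact ⟨hmem.1, hmem.2.1, hA, hmem.2.2.2⟩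
    · -- a column-0 window: use ¬ D_
      have hm : p.2 = (kn : Int) - 1 := by omega
      obtain ⟨cN, hcN⟩ : ∃ cN : Nat, p.1 = (cN : Int) := ⟨p.1.toNat, by omega⟩
      have hQW : pvQ matrix kn p.1 p.2 = pvW matrix kn cN (kn - 1) := by
        rw [hcN, hm, show (kn : Int) - 1 = ((kn - 1 : Nat) : Int) by omega]
        exact pvQ_eq_pvW matrix kn cN (kn - 1) (by omega)
      simp only [D_greatest_product_of_rev_diag] at hnd
      push Not at hnd
      have h1 := hmem.1
      have h2 := hmem.2.1
      have hmin : min ((kn : Int)).toNat (matrix.length + 1) = kn := by omega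
      rw [hmin] at hnd
      have himp := hnd cN (by omega)
      by_cases hpos : 0 < pvW matrix kn cN (kn - 1)
      · obtain ⟨c', hc', m', hm', hkm', hge⟩ := himp hpos
        rw [hQW]
        refine le_trans hge ?_
        have hc'k : c' + kn ≤ matrix.length :=
          pvW_pos_le matrix kn c' m' hk (by omega)
        rw [← pvQ_eq_pvW matrix kn c' m' (by omega)]
        apply pv_mem_le_foldl_max
        apply List.mem_map.2
        refine ⟨((c' : Int), (m' : Int)), ?_, rfl⟩
        rw [pvLA_mem matrix kn hk]
        refine ⟨by omega, by push_cast; omega, by omega, by omega⟩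
      · rw [hQW]
        exact le_trans (by omega) (pv_le_foldl_max _ 0)

-- inside D_, B strictly exceeds A
theorem pvD_lt (matrix : List (List Int)) (adjacent : Int)
    (hd : D_greatest_product_of_rev_diag matrix adjacent) :
    greatest_product_of_rev_diag matrix adjacent
      < greatest_product_of_rev_diag_alt matrix adjacent := by
  obtain ⟨c, hc, hpos, hdom⟩ := hd
  by_cases ha : 1 ≤ adjacent
  case neg =>
    exfalso
    have hk0 : min adjacent.toNat (matrix.length + 1) = 0 := by omega
    rw [hk0] at hdom
    have := hdom c hc 0 (by omega) (by omega)
    simp [pvW] at this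
  obtain ⟨kn, rfl⟩ : ∃ kn : Nat, adjacent = (kn : Int) := ⟨adjacent.toNat, by omega⟩
  have hk : 1 ≤ kn := by exact_mod_cast ha
  have h1k : 1 ≤ min ((kn : Int)).toNat (matrix.length + 1) := by omega
  have hck' := pvW_pos_le matrix _ c _ h1k hpos
  have hmin : min ((kn : Int)).toNat (matrix.length + 1) = kn := by omega
  rw [hmin] at hpos hdom
  have hck : c + kn ≤ matrix.length := pvW_pos_le matrix kn c (kn - 1) hk hpos
  have hW : pvQ matrix kn (c : Int) ((kn : Int) - 1) = pvW matrix kn c (kn - 1) := by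
    rw [show (kn : Int) - 1 = ((kn - 1 : Nat) : Int) by omega]
    exact pvQ_eq_pvW matrix kn c (kn - 1) (by omega)
  have hWB : pvW matrix kn c (kn - 1) ≤ greatest_product_of_rev_diag_alt matrix (kn : Int) := by
    rw [pvB_char matrix kn hk, pv_foldl_upd_map, ← hW]
    apply pv_mem_le_foldl_max
    apply List.mem_map.2
    refine ⟨((c : Int), (kn : Int) - 1), ?_, rfl⟩
    rw [pvLB_mem matrix kn hk]
    refine ⟨by omega, by push_cast; omega, by omega, by push_cast; omega⟩
  have hAW : greatest_product_of_rev_diag matrix (kn : Int) < pvW matrix kn c (kn - 1) := by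
    rw [pvA_char matrix kn hk, pv_foldl_upd_map]
    rcases pv_foldl_max_cases ((pvLA matrix (kn : Int)).map
        (fun p : Int × Int => pvQ matrix kn p.1 p.2)) 0 with h | h
    · rw [h]; exact hpos
    · rcases List.mem_map.1 h with ⟨p, hp, hq⟩
      rw [← hq]
      have hmem := (pvLA_mem matrix kn hk p).1 hp
      obtain ⟨c'N, hc'N⟩ : ∃ c'N : Nat, p.1 = (c'N : Int) := ⟨p.1.toNat, by omega⟩
      obtain ⟨m'N, hm'N⟩ : ∃ m'N : Nat, p.2 = (m'N : Int) := ⟨p.2.toNat, by omega⟩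
      have : pvQ matrix kn p.1 p.2 = pvW matrix kn c'N m'N := by
        rw [hc'N, hm'N]
        exact pvQ_eq_pvW matrix kn c'N m'N (by omega)
      rw [this]
      exact hdom c'N (by omega) m'N (by omega) (by omega)
  exact lt_of_lt_of_le hAW hWB

-- ===== VERDICT (by name: the statement is the Claim_ definition above) =====
theorem greatest_product_of_rev_diag_spec : Claim_unchanged_greatest_product_of_rev_diag := by
  intro matrix adjacent _ hpre
  unfold Spec_greatest_product_of_rev_diag
  intro hnd
  by_cases h0 : adjacent = 0
  · subst h0
    rw [pvA_nonpos matrix 0 (le_refl 0), pvB_zero matrix]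
  · have h1 : 1 ≤ adjacent := by rcases hpre with ⟨hp, _⟩; omega
    obtain ⟨kn, rfl⟩ : ∃ kn : Nat, adjacent = (kn : Int) := ⟨adjacent.toNat, by omega⟩
    exact pvMain_eq matrix kn (by exact_mod_cast h1) hnd

theorem greatest_product_of_rev_diag_changed : Claim_changed_greatest_product_of_rev_diag := by
  unfold Claim_changed_greatest_product_of_rev_diag; decide

theorem greatest_product_of_rev_diag_tight : Claim_exact_greatest_product_of_rev_diag := by
  intro matrix adjacent _ _ hd
  exact ne_of_lt (pvD_lt matrix adjacent hd)
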